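-- pv_equiv track=rewrite | github.com/jombaek/0_0_python | cub.py | increment_combination
-- ===== SOURCE A (Python) =====
-- def increment_combination(s):
--     last = int(s[-1]) + 1
--     if last <= 6:
--         return s[:-1] + str(last)
--     elif len(s) == 1:
--         return '11'
--     else:
--         return increment_combination(s[:-1]) + '1'
-- ===== SOURCE B (Python) =====
-- def increment_combination(s):
--     chars = list(s)
--     i = len(chars) - 1
--     while i >= 0 and int(chars[i]) + 1 > 6:
--         chars[i] = '1'
--         i -= 1
--     if i < 0:
--         return '1' + ''.join(chars)
--     chars[i] = str(int(chars[i]) + 1)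
--     return ''.join(chars)
-- ===== Notes on version B (the rewrite author's own statement) =====
-- stated objective: alternative
-- what changed: A's recursion, which re-slices the string and concatenates a result per carried digit, is replaced by a single iterative right-to-left pass over a char list that overwrites carrying positions and bumps the first non-carrying digit.
import Mathlib
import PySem

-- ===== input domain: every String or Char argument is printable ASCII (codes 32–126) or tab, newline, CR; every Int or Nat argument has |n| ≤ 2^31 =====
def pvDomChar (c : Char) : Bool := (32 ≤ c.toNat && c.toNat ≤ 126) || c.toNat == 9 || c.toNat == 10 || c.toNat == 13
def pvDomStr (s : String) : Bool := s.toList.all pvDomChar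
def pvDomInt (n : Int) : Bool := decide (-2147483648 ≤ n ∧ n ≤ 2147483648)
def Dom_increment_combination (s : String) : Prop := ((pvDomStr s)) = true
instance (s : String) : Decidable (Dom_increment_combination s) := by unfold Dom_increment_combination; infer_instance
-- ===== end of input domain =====

-- B replaces A's recursion (which rebuilds a sliced string per carry) by one right-to-left
-- iterative pass over a char list; return value only, no observable mutation in either.

-- ===== PORT A =====
-- A's recursion, on the string's char list: s[-1] is pyGet? (-1), s[:-1] is dropLast
-- (exact: PySem.Str.slice_to_neg_one), int(c) is PySem.Int.ofChars? [c]; where Python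
-- raises (pyGet?/ofChars? = none, outside Pre_) the port returns [].
def incAChars (cs : List Char) : List Char :=
  match h : PySem.List.pyGet? cs (-1) with
  | none => []
  | some c =>
    match PySem.Int.ofChars? [c] with
    | none => []
    | some t =>
      let last := t + 1
      if last ≤ 6 then cs.dropLast ++ PySem.Int.toChars last
      else if cs.length = 1 then ['1', '1']
      else incAChars cs.dropLast ++ ['1']
termination_by cs.length
decreasing_by
  have hne : cs ≠ [] := by
    intro hnil; subst hnil; simp [PySem.List.pyGet?, PySem.List.pyIdx?] at h
  have := List.length_pos_of_ne_nil hne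
  simp [List.length_dropLast]
  omega

def increment_combination (s : String) : String := String.ofList (incAChars s.toList)

-- ===== PORT B =====
-- Source B's while loop, scanning the reversed char list: each carrying position becomes a one,
-- the first non-carrying digit is bumped, exhaustion prepends a leading one; none = the
-- ValueError Source B's int() raises on a non-digit examined char.
def bCarryStep : List Char → Option (List Char)
  | [] => some ['1']
  | c :: rest =>
    match PySem.Int.ofChars? [c] with
    | none => none
    | some d =>
      if 6 < d + 1 then (bCarryStep rest).map (fun r => '1' :: r)
      else some ((PySem.Int.toChars (d + 1)).reverse ++ rest)

def increment_combination_alt (s : String) : String :=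
  match bCarryStep s.toList.reverse with
  | none => ""
  | some r => String.ofList r.reverse

-- ===== PRECONDITION & SPEC =====
-- carrying char: int(c) parses and int(c)+1 > 6 (digits six through nine)
def pvCarry (c : Char) : Bool :=
  match PySem.Int.ofChars? [c] with
  | some d => decide (6 < d + 1)
  | none => false

-- stopping char is fine: int(c) parses and int(c)+1 ≤ 6 (digits zero through five)
def pvOkStop (c : Char) : Bool :=
  match PySem.Int.ofChars? [c] with
  | some d => decide (d + 1 ≤ 6)
  | none => false

-- Pre_ excludes exactly the inputs where A raises: the empty string (IndexError on s[-1])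
-- and strings whose trailing run of carrying digits is followed (leftwards) by a char that
-- is not a digit below six — there int() raises ValueError.
def Pre_increment_combination (s : String) : Prop :=
  s.toList ≠ [] ∧ pvOkStop ((s.toList.reverse.dropWhile pvCarry).headD '0') = true
instance (s : String) : Decidable (Pre_increment_combination s) := by
  unfold Pre_increment_combination; infer_instance

def pvWitness_increment_combination : String := "126"

def Spec_increment_combination (s : String) (out : String) : Prop := out = increment_combination_alt s
instance (s : String) (out : String) : Decidable (Spec_increment_combination s out) := by unfold Spec_increment_combination; infer_instance

-- ===== CLAIM (what is proved, stated in full; the proofs are below) =====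
def Claim_equal_increment_combination : Prop := ∀ (s : String), Dom_increment_combination s → Pre_increment_combination s → Spec_increment_combination s (increment_combination s)

-- ===== LEMMAS AND PROOFS =====

-- Unfolding of A's recursion at a list with an explicit last element.
lemma incAChars_concat (xs : List Char) (c : Char) :
    incAChars (xs ++ [c]) =
      match PySem.Int.ofChars? [c] with
      | none => []
      | some t =>
        if t + 1 ≤ 6 then xs ++ PySem.Int.toChars (t + 1)
        else if xs = [] then ['1', '1']
        else incAChars xs ++ ['1'] := by
  have hget : PySem.List.pyGet? (xs ++ [c]) (-1) = some c := by simp [pysem]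
  rw [incAChars.eq_def]
  split
  · next heq => rw [hget] at heq; cases heq
  · next c' heq =>
    rw [hget] at heq
    obtain rfl : c = c' := Option.some.inj heq
    cases PySem.Int.ofChars? [c] with
    | none => rfl
    | some t =>
      simp only [List.dropLast_concat, List.length_append, List.length_cons,
        List.length_nil]
      by_cases ht : t + 1 ≤ 6
      · simp [ht]
      · simp only [ht, if_false]
        rcases xs with _ | ⟨x, xs'⟩ <;> simp

-- Invariant linking the two ports: on a nonempty reversed char list admitted by Pre_,
-- B's loop returns some output whose reverse is what A's recursion produces.
lemma incA_eq_bCarry (r : List Char) (hne : r ≠ [])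
    (hok : pvOkStop ((r.dropWhile pvCarry).headD '0') = true) :
    ∃ out, bCarryStep r = some out ∧ incAChars r.reverse = out.reverse := by
  induction r with
  | nil => exact absurd rfl hne
  | cons c rest ih =>
    have hrev : (c :: rest).reverse = rest.reverse ++ [c] := by simp
    cases hc : PySem.Int.ofChars? [c] with
    | none =>
      exfalso
      have hcar : pvCarry c = false := by simp [pvCarry, hc]
      rw [List.dropWhile_cons_of_neg (by simp [hcar])] at hok
      simp [pvOkStop, hc] at hok
    | some d =>
      by_cases hle : d + 1 ≤ 6
      · -- stopping digit: both replace the last char by d+1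
        refine ⟨(PySem.Int.toChars (d + 1)).reverse ++ rest, ?_, ?_⟩
        · simp only [bCarryStep, hc]; rw [if_neg (by omega)]
        · rw [hrev, incAChars_concat]
          simp [hc, hle]
      · -- carrying digit
        have hcar : pvCarry c = true := by simp [pvCarry, hc]; omega
        rw [List.dropWhile_cons_of_pos (by simp [hcar])] at hok
        cases rest with
        | nil =>
          refine ⟨['1', '1'], ?_, ?_⟩
          · simp [bCarryStep, hc, (by omega : 6 ≤ d)]
          · rw [hrev, incAChars_concat]
            simp [hc, hle]
        | cons c' rest' =>
          obtain ⟨out, hB, hA⟩ := ih (by simp) hok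
          refine ⟨'1' :: out, ?_, ?_⟩
          · simp only [bCarryStep, hc]
            rw [if_pos (by omega)]
            show Option.map (fun r => '1' :: r) (bCarryStep (c' :: rest')) = some ('1' :: out)
            rw [hB]
            rfl
          · rw [hrev, incAChars_concat]
            simp only [hc]
            rw [if_neg hle, if_neg (by simp), hA]
            simp

-- ===== VERDICT (by name: the statement is the Claim_ definition above) =====
theorem increment_combination_spec : Claim_equal_increment_combination := by
  intro s _ hpre
  obtain ⟨hne, hok⟩ := hpre
  obtain ⟨out, hB, hA⟩ :=
    incA_eq_bCarry s.toList.reverse (by simpa using hne) hok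
  unfold Spec_increment_combination increment_combination increment_combination_alt
  rw [hB]
  rw [List.reverse_reverse] at hA
  rw [hA]
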